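-- pv_equiv track=rewrite | github.com/parth314159/python_rep | Google_codejam_2016/Fractiles.py | give_out
-- ===== SOURCE A (Python) =====
-- def give_out(st,c):
--     temp = st
--     l = len(st)
--     for i in range(c-1):
--         ans = ""
--         for j in range(len(st)):
--             if st[j] == 'G':
--                 ans += 'G'*l
--             else:
--                 ans += temp
--         st = ans
--     return st
-- ===== SOURCE B (Python) =====
-- def give_out(st, c):
--     if c <= 1:
--         return st
--     rest = give_out(st, c - 1)
--     l = len(st)
--     gblock = 'G' * l ** (c - 1)
--     return ''.join(gblock if ch == 'G' else rest for ch in st)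
-- ===== Notes on version B (the rewrite author's own statement) =====
-- stated objective: alternative
-- what changed: Replaces A's iterative regrow-and-rescan of the full exponential string (c-1 passes over growing intermediates) with top-down recursion on c over the original length-l string, emitting a closed-form all-G block G**(l**(c-1)) for each 'G' and one shared recursive result for each other character.
import Mathlib
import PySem

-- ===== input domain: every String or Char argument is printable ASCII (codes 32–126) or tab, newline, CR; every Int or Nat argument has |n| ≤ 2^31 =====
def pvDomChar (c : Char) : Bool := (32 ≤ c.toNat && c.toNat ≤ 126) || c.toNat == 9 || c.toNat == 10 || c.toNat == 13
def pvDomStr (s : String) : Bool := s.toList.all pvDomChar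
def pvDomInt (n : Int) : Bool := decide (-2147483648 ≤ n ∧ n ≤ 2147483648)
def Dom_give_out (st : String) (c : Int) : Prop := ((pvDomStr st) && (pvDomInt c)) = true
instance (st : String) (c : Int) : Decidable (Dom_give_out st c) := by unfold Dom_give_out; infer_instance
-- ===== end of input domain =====

-- B replaces A's iterative regrow-and-rescan of the full string with top-down
-- recursion on c that scans only the original string, emitting a closed-form
-- G-block per 'G'; objective: alternative (no speed claim).

-- ===== PORT A =====
-- A: temp=st; l=len(st); repeat c-1 times: rebuild st by scanning its chars,
-- 'G' -> 'G'*l, else -> temp.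
def give_out (st : String) (c : Int) : String :=
  let temp := st.toList
  let l := temp.length
  let final := (PySem.List.pyRange 0 (c - 1) 1).foldl
    (fun cur _ =>
      (PySem.List.pyRange 0 (cur.length : Int) 1).foldl
        (fun ans j =>
          ans ++ (if PySem.List.pyGetD cur j ' ' = 'G' then List.replicate l 'G' else temp))
        [])
    st.toList
  String.ofList final

-- ===== PORT B =====
-- fuel = c-1 (B recurses on c, stopping at c ≤ 1)
def giveOutAltGo (orig : List Char) : Nat → List Char
  | 0 => orig
  | n + 1 =>
    let rest := giveOutAltGo orig n
    let l := orig.length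
    (orig.map (fun ch => if ch = 'G' then List.replicate (l ^ (n + 1)) 'G' else rest)).flatten

def give_out_alt (st : String) (c : Int) : String :=
  if c ≤ 1 then st else String.ofList (giveOutAltGo st.toList (c - 1).toNat)

-- ===== PRECONDITION & SPEC =====
def Spec_give_out (st : String) (c : Int) (out : String) : Prop := out = give_out_alt st c
instance (st : String) (c : Int) (out : String) : Decidable (Spec_give_out st c out) := by unfold Spec_give_out; infer_instance

-- ===== CLAIM (what is proved, stated in full; the proofs are below) =====
def Claim_equal_give_out : Prop := ∀ (st : String) (c : Int), Dom_give_out st c → Spec_give_out st c (give_out st c)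

-- ===== LEMMAS AND PROOFS =====

-- one step of A as a function of the current string
def stepA (temp : List Char) (l : Nat) (cur : List Char) : List Char :=
  (PySem.List.pyRange 0 (cur.length : Int) 1).foldl
    (fun ans j =>
      ans ++ (if PySem.List.pyGetD cur j ' ' = 'G' then List.replicate l 'G' else temp))
    []

theorem stepA_eq_flatten (temp : List Char) (l : Nat) (cur : List Char) :
    stepA temp l cur = (cur.map (fun ch => if ch = 'G' then List.replicate l 'G' else temp)).flatten := by
  unfold stepA
  rw [PySem.List.foldl_pyRange_zero_pyGetD' cur ' '
        (fun (a : List Char) (ch : Char) => a ++ (if ch = 'G' then List.replicate l 'G' else temp)) []]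
  induction cur using List.reverseRecOn with
  | nil => simp
  | append_singleton xs x ih => simp [ih]

theorem stepA_append (temp : List Char) (l : Nat) (xs ys : List Char) :
    stepA temp l (xs ++ ys) = stepA temp l xs ++ stepA temp l ys := by
  simp [stepA_eq_flatten]

theorem stepA_replicate_G (temp : List Char) (l k : Nat) :
    stepA temp l (List.replicate k 'G') = List.replicate (k * l) 'G' := by
  rw [stepA_eq_flatten]
  induction k with
  | zero => simp
  | succ k ih =>
    simp only [List.replicate_succ, List.map_cons, List.flatten_cons] at *
    rw [ih, Nat.succ_mul, Nat.add_comm, List.replicate_add]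
    simp

theorem stepA_flatten (temp : List Char) (l : Nat) (L : List (List Char)) :
    stepA temp l L.flatten = (L.map (stepA temp l)).flatten := by
  induction L with
  | nil => simp [stepA_eq_flatten]
  | cons x xs ih => simp [stepA_append, ih]

theorem stepA_altGo (orig : List Char) (n : Nat) :
    stepA orig orig.length (giveOutAltGo orig n) = giveOutAltGo orig (n + 1) := by
  induction n with
  | zero =>
    show stepA orig orig.length orig = _
    rw [stepA_eq_flatten]
    show _ = (orig.map (fun ch => if ch = 'G' then List.replicate (orig.length ^ (0 + 1)) 'G' else giveOutAltGo orig 0)).flatten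
    simp [giveOutAltGo]
  | succ n ih =>
    have hs : giveOutAltGo orig (n + 1)
        = (orig.map (fun ch => if ch = 'G' then List.replicate (orig.length ^ (n + 1)) 'G' else giveOutAltGo orig n)).flatten := rfl
    conv_lhs => rw [hs]
    rw [stepA_flatten, List.map_map]
    have hmap : orig.map (stepA orig orig.length ∘ fun ch => if ch = 'G' then List.replicate (orig.length ^ (n + 1)) 'G' else giveOutAltGo orig n)
        = orig.map (fun ch => if ch = 'G' then List.replicate (orig.length ^ (n + 1 + 1)) 'G' else giveOutAltGo orig (n + 1)) := by
      refine List.map_congr_left ?_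
      intro ch _
      by_cases hch : ch = 'G'
      · simp [hch, stepA_replicate_G, pow_succ, Function.comp]
      · simp [hch, ih, Function.comp]
    rw [hmap]
    rfl

theorem foldl_const_stepA (orig : List Char) (xs : List Int) (k : Nat) :
    xs.foldl (fun cur _ => stepA orig orig.length cur) (giveOutAltGo orig k)
      = giveOutAltGo orig (k + xs.length) := by
  induction xs generalizing k with
  | nil => simp
  | cons x xs ih =>
    simp only [List.foldl_cons, List.length_cons]
    rw [stepA_altGo, ih]
    ring_nf

-- ===== VERDICT (by name: the statement is the Claim_ definition above) =====
theorem give_out_spec : Claim_equal_give_out := by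
  intro st c _
  unfold Spec_give_out give_out give_out_alt
  simp only []
  by_cases h : c ≤ 1
  · rw [PySem.List.pyRange_one_eq_nil (by omega)]
    simp only [List.foldl_nil, if_pos h]
    exact String.ofList_toList
  · rw [if_neg h]
    have h0 : giveOutAltGo st.toList 0 = st.toList := rfl
    have := foldl_const_stepA st.toList (PySem.List.pyRange 0 (c - 1) 1) 0
    rw [h0] at this
    rw [show (fun (cur : List Char) (_ : Int) =>
        (PySem.List.pyRange 0 (cur.length : Int) 1).foldl
          (fun ans j =>
            ans ++ (if PySem.List.pyGetD cur j ' ' = 'G' then List.replicate st.toList.length 'G' else st.toList))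
          []) = fun cur _ => stepA st.toList st.toList.length cur from rfl]
    rw [this, PySem.List.length_pyRange_one]
    simp
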